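-- pv_equiv track=rewrite | github.com/university1905/Big-Data-Analytics- | Final/Assignment3/reducer.py | term_frequency_fun
-- ===== SOURCE A (Python) =====
-- def term_frequency_fun(vocabulary, query):
--
--     term_frequency = {}
--     # Calculate term frequency for each document
--
--     tf_vector = {word_id: 0 for word_id in vocabulary.values()}
--     # Split document into words
--     words = query.lower().split()
--     # Count term frequency for each word
--     for word in words:
--
--         if word in vocabulary:
--             word_id = vocabulary[word]
--             tf_vector[word_id] += 1
--     # Store term frequency vector for current document
--     term_frequency["query"] = tf_vector
--
--     return term_frequency
-- ===== SOURCE B (Python) =====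
-- def term_frequency_fun(vocabulary, query):
--     # Build a frequency table of the query once, then make ONE pass over the
--     # vocabulary adding each word's count to its id (instead of membership-testing
--     # every query word against the vocabulary).
--     counts = {}
--     for word in query.lower().split():
--         counts[word] = counts.get(word, 0) + 1
--     tf_vector = {word_id: 0 for word_id in vocabulary.values()}
--     for word, word_id in vocabulary.items():
--         tf_vector[word_id] += counts.get(word, 0)
--     return {"query": tf_vector}
-- ===== Notes on version B (the rewrite author's own statement) =====
-- stated objective: alternative
-- what changed: B builds a frequency table of the query words once and then makes a single pass over the vocabulary adding each word's count to its id, instead of A's pass over the query words with a membership test and lookup into the vocabulary per word; Pre_ requires distinct vocabulary keys because the association list encodes a Python dict, which cannot hold duplicate keys.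
import Mathlib
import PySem

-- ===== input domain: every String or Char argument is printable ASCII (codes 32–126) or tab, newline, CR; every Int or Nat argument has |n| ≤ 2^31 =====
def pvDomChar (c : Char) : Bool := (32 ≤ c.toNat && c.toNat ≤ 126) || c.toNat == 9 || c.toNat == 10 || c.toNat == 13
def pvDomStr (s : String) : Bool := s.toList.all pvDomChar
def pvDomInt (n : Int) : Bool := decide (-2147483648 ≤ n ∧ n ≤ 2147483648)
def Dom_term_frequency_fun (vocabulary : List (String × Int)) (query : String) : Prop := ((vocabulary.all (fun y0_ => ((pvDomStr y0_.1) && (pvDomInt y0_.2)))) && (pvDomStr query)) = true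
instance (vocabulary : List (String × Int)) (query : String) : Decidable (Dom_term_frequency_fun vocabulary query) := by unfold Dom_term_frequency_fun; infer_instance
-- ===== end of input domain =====

-- B changes the traversal direction: one frequency table of the query, then one pass over the vocabulary (objective: alternative, same cost class).

-- ===== PORT A =====
-- shared with B (both Pythons contain these same expressions):
-- {word_id: 0 for word_id in vocabulary.values()}
def pvTfInit (vocabulary : List (String × Int)) : PySem.Dict Int Int :=
  vocabulary.foldl (fun d p => d.insert p.2 0) PySem.Dict.empty
-- query.lower().split()
def pvWords (query : String) : List String :=
  PySem.Str.split₀ (PySem.Str.lower query)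
-- 'word in vocabulary' / 'vocabulary[word]' on the association list encoding the dict: first match
def pvLookup (vocabulary : List (String × Int)) (w : String) : Option (String × Int) :=
  vocabulary.find? (fun p => p.1 == w)

def term_frequency_fun (vocabulary : List (String × Int)) (query : String) : List (String × List (Int × Int)) :=
  let tf := (pvWords query).foldl (fun d w =>
      match pvLookup vocabulary w with
      | some p => d.modify p.2 0 (· + 1)   -- tf_vector[word_id] += 1 (key is always present: word_id ∈ vocabulary.values())
      | none => d) (pvTfInit vocabulary)
  [("query", tf.items)]

-- ===== PORT B =====
def term_frequency_fun_alt (vocabulary : List (String × Int)) (query : String) : List (String × List (Int × Int)) :=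
  let counts : PySem.Dict String Int := (pvWords query).foldl (fun d w => d.insert w (d.getD w 0 + 1)) PySem.Dict.empty
  let tf := vocabulary.foldl (fun d p => d.modify p.2 0 (· + counts.getD p.1 0)) (pvTfInit vocabulary)
  [("query", tf.items)]

-- ===== PRECONDITION & SPEC =====
-- Pre_ requires distinct vocabulary keys: the association list encodes a Python dict, which cannot hold duplicate keys.
def Pre_term_frequency_fun (vocabulary : List (String × Int)) (query : String) : Prop :=
  (vocabulary.map Prod.fst).Nodup
instance (vocabulary : List (String × Int)) (query : String) : Decidable (Pre_term_frequency_fun vocabulary query) := by unfold Pre_term_frequency_fun; infer_instance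
def pvWitness_term_frequency_fun : (List (String × Int)) × String := ([("cat", 0), ("dog", 1)], "Dog cat dog bird")

def Spec_term_frequency_fun (vocabulary : List (String × Int)) (query : String) (out : List (String × List (Int × Int))) : Prop := out = term_frequency_fun_alt vocabulary query
instance (vocabulary : List (String × Int)) (query : String) (out : List (String × List (Int × Int))) : Decidable (Spec_term_frequency_fun vocabulary query out) := by unfold Spec_term_frequency_fun; infer_instance

-- ===== CLAIM (what is proved, stated in full; the proofs are below) =====
def Claim_equal_term_frequency_fun : Prop := ∀ (vocabulary : List (String × Int)) (query : String), Dom_term_frequency_fun vocabulary query → Pre_term_frequency_fun vocabulary query → Spec_term_frequency_fun vocabulary query (term_frequency_fun vocabulary query)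

-- ===== LEMMAS AND PROOFS =====

-- keys of the init dict
theorem pv_mem_keys_tfInit (v : List (String × Int)) (k : Int) :
    k ∈ (pvTfInit v).keys ↔ k ∈ v.map Prod.snd := by
  unfold pvTfInit
  rw [PySem.Dict.keys_foldl_insert_key v Prod.snd (fun _ _ => (0:Int)) PySem.Dict.empty]
  rw [PySem.Dict.keys_empty]
  rw [PySem.Set.mem_update]
  simp

theorem pv_nodup_keys_tfInit (v : List (String × Int)) : (pvTfInit v).keys.Nodup := by
  unfold pvTfInit
  exact PySem.Dict.nodup_keys_foldl_insert_key v Prod.snd _ _ (by simp [PySem.Dict.keys_empty])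

-- A's fold keeps the keys (every modified key is already present)
theorem pv_keysA (v : List (String × Int)) (ws : List String) (d : PySem.Dict Int Int)
    (h : ∀ k ∈ v.map Prod.snd, k ∈ d.keys) :
    (ws.foldl (fun d w =>
      match pvLookup v w with
      | some p => d.modify p.2 0 (· + 1)
      | none => d) d).keys = d.keys := by
  induction ws generalizing d with
  | nil => rfl
  | cons w ws ih =>
    simp only [List.foldl_cons]
    cases hl : pvLookup v w with
    | none => simp only [hl]; exact ih d h
    | some p =>
      have hpmem : p ∈ v := List.mem_of_find?_eq_some hl
      have hk : p.2 ∈ d.keys := h p.2 (List.mem_map_of_mem hpmem)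
      have hc : d.contains p.2 = true := (PySem.Dict.contains_iff_mem_keys d p.2).2 hk
      have hkeys : (d.modify p.2 0 (· + 1)).keys = d.keys := by
        rw [PySem.Dict.keys_modify, PySem.Dict.keys_insert_of_contains d _ hc]
      simp only [hl]
      rw [ih _ (fun k hk' => hkeys ▸ h k hk'), hkeys]

-- B's fold keeps the keys
theorem pv_keysB (counts : PySem.Dict String Int) (l : List (String × Int)) (d : PySem.Dict Int Int)
    (h : ∀ p ∈ l, p.2 ∈ d.keys) :
    (l.foldl (fun d p => d.modify p.2 0 (· + counts.getD p.1 0)) d).keys = d.keys := by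
  induction l generalizing d with
  | nil => rfl
  | cons p l ih =>
    simp only [List.foldl_cons]
    have hc : d.contains p.2 = true := (PySem.Dict.contains_iff_mem_keys d p.2).2 (h p (by simp))
    have hkeys : (d.modify p.2 0 (· + counts.getD p.1 0)).keys = d.keys := by
      rw [PySem.Dict.keys_modify, PySem.Dict.keys_insert_of_contains d _ hc]
    rw [ih _ (fun q hq => hkeys ▸ h q (by simp [hq])), hkeys]

-- value of A's fold
theorem pv_valA (v : List (String × Int)) (ws : List String) (d : PySem.Dict Int Int) (k : Int) :
    (ws.foldl (fun d w =>
      match pvLookup v w with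
      | some p => d.modify p.2 0 (· + 1)
      | none => d) d).getD k 0
    = d.getD k 0 + (ws.countP (fun w => (pvLookup v w).map Prod.snd == some k) : Int) := by
  induction ws generalizing d with
  | nil => simp
  | cons w ws ih =>
    simp only [List.foldl_cons, List.countP_cons]
    cases hl : pvLookup v w with
    | none => simp [hl, ih]
    | some p =>
      simp only [hl]
      rw [ih]
      by_cases hk : k = p.2
      · subst hk
        rw [PySem.Dict.getD_modify_self]
        simp
        omega
      · rw [PySem.Dict.getD_modify_of_ne d 0 _ hk]
        simp [Option.map, Ne.symm hk]

-- value of B's fold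
theorem pv_valB (counts : PySem.Dict String Int) (l : List (String × Int)) (d : PySem.Dict Int Int) (k : Int) :
    (l.foldl (fun d p => d.modify p.2 0 (· + counts.getD p.1 0)) d).getD k 0
    = d.getD k 0 + ((l.filter (fun p => p.2 == k)).map (fun p => counts.getD p.1 0)).sum := by
  induction l generalizing d with
  | nil => simp
  | cons p l ih =>
    simp only [List.foldl_cons, List.filter_cons]
    by_cases hk : p.2 = k
    · subst hk
      rw [ih, PySem.Dict.getD_modify_self]
      simp
      ring
    · have hne : k ≠ p.2 := fun h => hk h.symm
      rw [ih, PySem.Dict.getD_modify_of_ne d 0 _ hne]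
      simp [beq_iff_eq, hk]

theorem pv_countP_if (ws : List String) (a : String) (b : Bool) (q : String → Bool) :
    ws.countP (fun w => if a == w then b else q w)
    = (if b then ws.count a else 0) + ws.countP (fun w => !(a == w) && q w) := by
  induction ws with
  | nil => simp
  | cons w ws ih =>
    simp only [List.countP_cons, List.count_cons, ih]
    by_cases h : a = w
    · subst h; cases b <;> simp <;> omega
    · have h1 : (a == w) = false := by simp [h]
      have h2 : (w == a) = false := by simp [Ne.symm h]
      cases b <;> simp [h1, h2] <;> omega

theorem pv_core (v : List (String × Int)) (hnd : (v.map Prod.fst).Nodup) (k : Int) (ws : List String) :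
    (ws.countP (fun w => (pvLookup v w).map Prod.snd == some k) : Int)
    = ((v.filter (fun p => p.2 == k)).map (fun p => (ws.count p.1 : Int))).sum := by
  induction v with
  | nil => simp [pvLookup]
  | cons p rest ih =>
    have hnd2 : (p.1 :: rest.map Prod.fst).Nodup := by simpa using hnd
    have hp : p.1 ∉ rest.map Prod.fst := (List.nodup_cons.1 hnd2).1
    have hnd' : (rest.map Prod.fst).Nodup := (List.nodup_cons.1 hnd2).2
    have hpred : ∀ w, ((pvLookup (p :: rest) w).map Prod.snd == some k)
        = (if p.1 == w then (p.2 == k) else ((pvLookup rest w).map Prod.snd == some k)) := by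
      intro w
      by_cases h : p.1 = w
      · rw [pvLookup, List.find?_cons_of_pos (by simp [h])]
        simp [h]
      · rw [pvLookup, List.find?_cons_of_neg (by simp [h])]
        have hb : (p.1 == w) = false := by simp [h]
        simp only [hb, Bool.false_eq_true, if_false]
        rfl
    rw [show (fun w => (pvLookup (p :: rest) w).map Prod.snd == some k)
        = (fun w => if p.1 == w then (p.2 == k) else ((pvLookup rest w).map Prod.snd == some k))
        from funext hpred]
    rw [pv_countP_if]
    have hdisj : ∀ w, (!(p.1 == w) && ((pvLookup rest w).map Prod.snd == some k))
        = ((pvLookup rest w).map Prod.snd == some k) := by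
      intro w
      by_cases h : ((pvLookup rest w).map Prod.snd == some k) = true
      · obtain ⟨q, hq, hqk⟩ : ∃ q, pvLookup rest w = some q ∧ q.2 = k := by
          cases hl : pvLookup rest w with
          | none => simp [hl] at h
          | some q => exact ⟨q, rfl, by simpa [hl] using h⟩
        have hq1 : q.1 = w := by
          have := List.find?_some hq
          simpa using this
        have hqm : q ∈ rest := List.mem_of_find?_eq_some hq
        have : w ∈ rest.map Prod.fst := hq1 ▸ List.mem_map_of_mem hqm
        have hne : p.1 ≠ w := fun he => hp (he ▸ this)
        simp [h, hne]
      · simp at h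
        simp [h]
    rw [show (fun w => !(p.1 == w) && ((pvLookup rest w).map Prod.snd == some k))
        = (fun w => ((pvLookup rest w).map Prod.snd == some k)) from funext hdisj]
    simp only [List.filter_cons]
    by_cases hk : p.2 = k
    · simp only [hk, beq_self_eq_true, if_true, List.map_cons, List.sum_cons]
      rw [← ih hnd']
      push_cast
      ring
    · have : (p.2 == k) = false := by simp [hk]
      simp only [this, if_false, Bool.false_eq_true, Nat.zero_add]
      exact ih hnd'

theorem pv_main (v : List (String × Int)) (q : String) (hnd : (v.map Prod.fst).Nodup) :
    term_frequency_fun v q = term_frequency_fun_alt v q := by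
  unfold term_frequency_fun term_frequency_fun_alt
  simp only []
  set ws := pvWords q with hws
  set tf0 := pvTfInit v with htf0
  set counts : PySem.Dict String Int := ws.foldl (fun d w => d.insert w (d.getD w 0 + 1)) PySem.Dict.empty with hc
  set tfA := ws.foldl (fun d w =>
      match pvLookup v w with
      | some p => d.modify p.2 0 (· + 1)
      | none => d) tf0 with hA
  set tfB := v.foldl (fun d p => d.modify p.2 0 (· + counts.getD p.1 0)) tf0 with hB
  have hsub : ∀ k ∈ v.map Prod.snd, k ∈ tf0.keys := fun k hk => (pv_mem_keys_tfInit v k).2 hk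
  have hKA : tfA.keys = tf0.keys := pv_keysA v ws tf0 hsub
  have hKB : tfB.keys = tf0.keys := pv_keysB counts v tf0 (fun p hp => hsub p.2 (List.mem_map_of_mem hp))
  have hnd0 := pv_nodup_keys_tfInit v
  have hcounts : ∀ w, counts.getD w 0 = (ws.count w : Int) := by
    intro w
    rw [hc, PySem.Dict.getD_foldl_insert_add_one, PySem.Dict.getD_empty]
    simp
  have hval : ∀ k, tfA.getD k 0 = tfB.getD k 0 := by
    intro k
    rw [hA, hB, pv_valA, pv_valB]
    rw [show (fun (p : String × Int) => counts.getD p.1 0) = (fun p => (ws.count p.1 : Int))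
        from funext (fun p => hcounts p.1)]
    rw [pv_core v hnd k ws]
  have hitems : tfA.items = tfB.items := by
    rw [PySem.Dict.items_eq_map_keys tfA (hKA ▸ hnd0) 0,
        PySem.Dict.items_eq_map_keys tfB (hKB ▸ hnd0) 0, hKA, hKB]
    exact List.map_congr_left (fun k _ => by rw [hval k])
  rw [hitems]

-- ===== VERDICT (by name: the statement is the Claim_ definition above) =====
theorem term_frequency_fun_spec : Claim_equal_term_frequency_fun := by
  intro vocabulary query _ hpre
  unfold Spec_term_frequency_fun
  exact pv_main vocabulary query hpre
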